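-- pv_equiv track=rewrite | github.com/Package/Daily-Programmer-Python | 294.py | scrabble
-- ===== SOURCE A (Python) =====
-- def scrabble(letters, target):
--     blanks = letters.count("?")
--     letters = list(letters)
--     matched = 0
--
--     for t in target:
--         # Can use the blanks and what we have already matched to complete the word
--         if matched + blanks >= len(target):
--             break
--
--         if t in letters:
--             letters.remove(t)
--             matched += 1
--         elif blanks > 0:
--             matched += 1
--             blanks -= 1
--         else:
--             return False
--
--     return True
-- ===== SOURCE B (Python) =====
-- def scrabble(letters, target):
--     blanks = letters.count("?")
--     ls = sorted(letters)
--     ts = sorted(target)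
--     i = j = matches = 0
--     while i < len(ls) and j < len(ts):
--         if ls[i] == ts[j]:
--             matches += 1
--             i += 1
--             j += 1
--         elif ls[i] < ts[j]:
--             i += 1
--         else:
--             j += 1
--     return blanks >= len(target) - matches
-- ===== Notes on version B (the rewrite author's own statement) =====
-- stated objective: faster
-- what changed: Replaces the per-character membership test and in-place list removal (a scan of letters per target character) with a sort of both strings followed by one two-pointer merge pass counting multiset matches, then a single comparison against the blank count.
import Mathlib
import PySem

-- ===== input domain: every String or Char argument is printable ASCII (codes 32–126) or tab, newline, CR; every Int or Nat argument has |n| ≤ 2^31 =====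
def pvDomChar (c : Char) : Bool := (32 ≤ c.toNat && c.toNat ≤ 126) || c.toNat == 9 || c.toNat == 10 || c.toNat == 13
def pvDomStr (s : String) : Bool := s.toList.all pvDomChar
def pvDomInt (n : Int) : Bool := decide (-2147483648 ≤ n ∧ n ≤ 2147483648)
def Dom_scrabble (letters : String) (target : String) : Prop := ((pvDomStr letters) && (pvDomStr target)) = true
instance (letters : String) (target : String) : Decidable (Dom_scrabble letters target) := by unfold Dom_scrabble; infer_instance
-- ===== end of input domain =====

-- B replaces A's per-character membership test and in-place removal by sorting both
-- strings once and counting multiset matches in a single two-pointer merge pass (alternative algorithm).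

-- ===== PORT A =====
-- the for-loop over target: state = (letters list, matched, blanks); break / return False kept in order
def scrabbleLoop (total : Nat) (ts : List Char) (letters : List Char)
    (matched blanks : Nat) : Bool :=
  match ts with
  | [] => true
  | t :: rest =>
    if total ≤ matched + blanks then true
    else if t ∈ letters then scrabbleLoop total rest (letters.erase t) (matched + 1) blanks
    else if 0 < blanks then scrabbleLoop total rest letters (matched + 1) (blanks - 1)
    else false

def scrabble (letters : String) (target : String) : Bool :=
  scrabbleLoop target.toList.length target.toList letters.toList 0
    (PySem.Str.count letters "?")

-- ===== PORT B =====
-- two-pointer merge over the two sorted character lists, counting equal pairs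
def mergeCount (ls ts : List Char) : Nat :=
  match ls, ts with
  | a :: ls', b :: ts' =>
    if a = b then mergeCount ls' ts' + 1
    else if a < b then mergeCount ls' (b :: ts')
    else mergeCount (a :: ls') ts'
  | _, _ => 0

def scrabble_alt (letters : String) (target : String) : Bool :=
  let blanks : Nat := PySem.Str.count letters "?"
  let ls := PySem.List.sorted letters.toList (fun x => x) false
  let ts := PySem.List.sorted target.toList (fun x => x) false
  let nmatch := mergeCount ls ts
  decide ((blanks : Int) ≥ (target.toList.length : Int) - (nmatch : Int))

-- ===== PRECONDITION & SPEC =====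
def Spec_scrabble (letters : String) (target : String) (out : Bool) : Prop := out = scrabble_alt letters target
instance (letters : String) (target : String) (out : Bool) : Decidable (Spec_scrabble letters target out) := by unfold Spec_scrabble; infer_instance

-- ===== CLAIM (what is proved, stated in full; the proofs are below) =====
def Claim_equal_scrabble : Prop := ∀ (letters : String) (target : String), Dom_scrabble letters target → Spec_scrabble letters target (scrabble letters target)

-- ===== LEMMAS AND PROOFS =====

-- multiset intersection size (per character: min of the two occurrence counts)
def ic (ls ts : List Char) : Nat := ((↑ls : Multiset Char) ∩ (↑ts : Multiset Char)).card

theorem ic_le_right (ls ts : List Char) : ic ls ts ≤ ts.length := by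
  have h : ((↑ls : Multiset Char) ∩ ↑ts) ≤ ↑ts := Multiset.inter_le_right
  simpa [ic] using Multiset.card_le_card h

theorem ic_cons_of_mem (ls ts : List Char) (t : Char) (h : t ∈ ls) :
    ic ls (t :: ts) = ic (ls.erase t) ts + 1 := by
  unfold ic
  rw [← Multiset.cons_coe, Multiset.inter_comm, Multiset.cons_inter_of_pos _ (by simpa using h),
    Multiset.card_cons, Multiset.inter_comm, ← Multiset.coe_erase]

theorem ic_cons_of_not_mem (ls ts : List Char) (t : Char) (h : t ∉ ls) :
    ic ls (t :: ts) = ic ls ts := by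
  unfold ic
  rw [← Multiset.cons_coe, Multiset.inter_comm, Multiset.cons_inter_of_neg _ (by simpa using h),
    Multiset.inter_comm]

theorem ic_cons_left_of_not_mem (ls ts : List Char) (a : Char) (h : a ∉ ts) :
    ic (a :: ls) ts = ic ls ts := by
  unfold ic
  rw [← Multiset.cons_coe, Multiset.cons_inter_of_neg _ (by simpa using h)]

theorem ic_perm_left {ls ls' : List Char} (ts : List Char) (h : ls.Perm ls') :
    ic ls ts = ic ls' ts := by
  simp only [ic]; rw [Multiset.coe_eq_coe.mpr h]

theorem ic_perm_right (ls : List Char) {ts ts' : List Char} (h : ts.Perm ts') :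
    ic ls ts = ic ls ts' := by
  simp only [ic]; rw [Multiset.coe_eq_coe.mpr h]

-- invariant of A's loop: with total = matched + |remaining target|,
-- it returns true iff the blanks cover what the intersection with the remaining letters does not
theorem scrabbleLoop_eq (ts : List Char) :
    ∀ (total : Nat) (cl : List Char) (m b : Nat), total = m + ts.length →
    scrabbleLoop total ts cl m b = decide (ts.length ≤ b + ic cl ts) := by
  induction ts with
  | nil => intro total cl m b _; simp [scrabbleLoop]
  | cons t rest ih =>
    intro total cl m b htot
    simp only [scrabbleLoop]
    by_cases hbrk : total ≤ m + b
    · rw [if_pos hbrk]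
      have h1 : rest.length + 1 ≤ b := by simp at htot; omega
      symm
      simp only [decide_eq_true_eq, List.length_cons]
      omega
    · rw [if_neg hbrk]
      have hb' : ¬ rest.length + 1 ≤ b := by simp at htot; omega
      by_cases hmem : t ∈ cl
      · rw [if_pos hmem, ih total (cl.erase t) (m + 1) b (by simp at htot ⊢; omega)]
        rw [ic_cons_of_mem cl rest t hmem]
        simp only [decide_eq_decide, List.length_cons]
        omega
      · rw [if_neg hmem]
        rw [ic_cons_of_not_mem cl rest t hmem]
        by_cases hpos : 0 < b
        · rw [if_pos hpos, ih total cl (m + 1) (b - 1) (by simp at htot ⊢; omega)]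
          simp only [decide_eq_decide, List.length_cons]
          omega
        · rw [if_neg hpos]
          have := ic_le_right cl rest
          symm
          simp only [decide_eq_false_iff_not, List.length_cons]
          omega

-- the two-pointer merge over two sorted lists counts the multiset intersection
theorem mergeCount_eq_ic : ∀ (ls ts : List Char),
    ls.Pairwise (· ≤ ·) → ts.Pairwise (· ≤ ·) → mergeCount ls ts = ic ls ts := by
  intro ls
  induction ls with
  | nil => intro ts _ _; cases ts <;> simp [mergeCount, ic]
  | cons a ls' ihl =>
    intro ts hls hts
    induction ts with
    | nil => simp [mergeCount, ic]
    | cons b ts' iht =>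
      simp only [mergeCount]
      by_cases hab : a = b
      · subst hab
        rw [if_pos rfl, ihl ts' (List.Pairwise.of_cons hls) (List.Pairwise.of_cons hts),
          ic_cons_of_mem (a :: ls') ts' a (by simp)]
        rw [List.erase_cons_head]
      · rw [if_neg hab]
        by_cases hlt : a < b
        · rw [if_pos hlt, ihl (b :: ts') (List.Pairwise.of_cons hls) hts]
          have hnot : a ∉ b :: ts' := by
            intro hmem
            rcases List.mem_cons.mp hmem with h | h
            · exact hab h
            · exact absurd (lt_of_lt_of_le hlt ((List.pairwise_cons.mp hts).1 a h))
                (lt_irrefl a)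
          exact (ic_cons_left_of_not_mem ls' (b :: ts') a hnot).symm
        · rw [if_neg hlt, iht (List.Pairwise.of_cons hts)]
          have hnot : b ∉ a :: ls' := by
            intro hmem
            rcases List.mem_cons.mp hmem with h | h
            · exact hab h.symm
            · have hle := (List.pairwise_cons.mp hls).1 b h
              have : a < b := lt_of_le_of_ne (le_of_not_gt (fun hgt =>
                absurd hle (not_le.mpr hgt))) hab
              exact hlt this
          exact (ic_cons_of_not_mem (a :: ls') ts' b hnot).symm

-- ===== VERDICT (by name: the statement is the Claim_ definition above) =====
theorem scrabble_spec : Claim_equal_scrabble := by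
  intro letters target _
  unfold Spec_scrabble scrabble scrabble_alt
  rw [scrabbleLoop_eq target.toList target.toList.length letters.toList 0
    (PySem.Str.count letters "?") (by simp)]
  have hsl : (PySem.List.sorted letters.toList (fun x => x) false).Pairwise (· ≤ ·) := by
    simpa using PySem.List.sorted_pairwise letters.toList (fun x => x)
  have hst : (PySem.List.sorted target.toList (fun x => x) false).Pairwise (· ≤ ·) := by
    simpa using PySem.List.sorted_pairwise target.toList (fun x => x)
  simp only [mergeCount_eq_ic _ _ hsl hst]
  rw [ic_perm_left _ (PySem.List.sorted_perm letters.toList (fun x => x) false),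
    ic_perm_right _ (PySem.List.sorted_perm target.toList (fun x => x) false)]
  simp only [decide_eq_decide, ge_iff_le]
  omega
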